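-- pv_equiv track=rewrite | github.com/kalvaakhil/akhil-leetcode | Find k-th smallest element in given n ranges - GFG/find-kth-smallest-element-in-given-n-ranges.py | kthSmallestNum
-- ===== SOURCE A (Python) =====
-- from typing import List
-- from bisect import bisect_left
--
-- def kthSmallestNum(n : int, ranges : List[List[int]], q : int, queries : List[int]) -> List[int]:
--     # code here
--     ranges.sort()
--     ans=[ranges[0]]
--     for i in range(1,n):
--         if ans[-1][1]>=ranges[i][0]:
--             ans[-1][1]=max(ans[-1][1],ranges[i][1])
--         else:
--             ans.append(ranges[i])
--     m=len(ans)
--     s=[0]*m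
--     s[0]=ans[0][1]-ans[0][0]+1
--     for i in range(1,m):
--         s[i]+=(s[i-1]+ans[i][1]-ans[i][0]+1)
--     fans=[]
--     for qq in queries:
--         i=bisect_left(s,qq)
--         if i==m:
--             fans+=[-1]
--         else:
--             ss=0
--             if i>0:
--                 ss=s[i-1]
--             d=s[i]-qq
--             fans+=[ans[i][1]-d]
--     return fans
-- ===== SOURCE B (Python) =====
-- def kthSmallestNum(n, ranges, q, queries):
--     # B: same sort+merge phase as A, but building fresh (lo, hi) tuples; the
--     # query phase drops A's prefix-sum table + bisect_left and answers each
--     # query by a single linear scan with a running count.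
--     # Like A, B sorts `ranges` in place; unlike A it does not mutate its rows.
--     ranges.sort()
--     first = ranges[0]
--     merged = [(first[0], first[1])]
--     for i in range(1, n):
--         lo, hi = ranges[i][0], ranges[i][1]
--         mlo, mhi = merged[-1]
--         if mhi >= lo:
--             if hi > mhi:
--                 merged[-1] = (mlo, hi)
--         else:
--             merged.append((lo, hi))
--
--     def answer(qq):
--         run = 0
--         for lo, hi in merged:
--             cnt = hi - lo + 1
--             if run + cnt >= qq:
--                 return lo + (qq - run - 1)
--             run += cnt
--         return -1
--
--     return [answer(qq) for qq in queries]
-- ===== Notes on version B (the rewrite author's own statement) =====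
-- stated objective: simpler
-- what changed: B keeps A's sort+merge phase (building fresh (lo,hi) tuples instead of mutating rows of the argument) but drops A's prefix-sum table and bisect_left lookup entirely: each query is answered by a single linear scan over the merged intervals with a running count.
-- outside the precondition, e.g. on kthSmallestNum(2, [[0, 0], [1, -1]], 1, [1]): A returns [-1], B returns [0]
import Mathlib
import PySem

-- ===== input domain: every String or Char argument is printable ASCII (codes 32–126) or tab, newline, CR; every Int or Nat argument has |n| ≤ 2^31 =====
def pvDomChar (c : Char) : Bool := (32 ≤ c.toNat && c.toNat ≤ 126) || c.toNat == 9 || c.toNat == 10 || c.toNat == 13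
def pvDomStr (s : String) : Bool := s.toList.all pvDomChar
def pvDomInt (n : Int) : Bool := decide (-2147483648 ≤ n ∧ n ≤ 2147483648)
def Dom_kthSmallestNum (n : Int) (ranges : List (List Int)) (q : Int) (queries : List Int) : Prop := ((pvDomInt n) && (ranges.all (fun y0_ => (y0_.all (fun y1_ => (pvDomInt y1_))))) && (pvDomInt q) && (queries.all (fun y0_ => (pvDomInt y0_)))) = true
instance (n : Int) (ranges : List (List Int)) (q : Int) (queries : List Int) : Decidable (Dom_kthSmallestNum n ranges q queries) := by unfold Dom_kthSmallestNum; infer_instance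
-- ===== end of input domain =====

-- B keeps A's sort+merge phase (into fresh tuples) but answers each query by a linear scan
-- with a running count instead of A's prefix-sum table + bisect_left (simpler, not faster).
-- Return-value equivalence only: both sort `ranges` in place, and A additionally mutates
-- rows of `ranges` (its merged list shares references with `ranges`) while B does not.

-- ===== PORT A =====
-- A's merge-loop body: ans[-1][1] >= r[0] → extend last interval, else append the row.
def pvMergeStepA (ans : List (List Int)) (r : List Int) : List (List Int) :=
  let last := ans.getLast?.getD []
  if PySem.List.pyGetD last 1 0 ≥ PySem.List.pyGetD r 0 0 then
    ans.dropLast ++ [[PySem.List.pyGetD last 0 0, max (PySem.List.pyGetD last 1 0) (PySem.List.pyGetD r 1 0)]]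
  else
    ans ++ [r]

-- A's prefix-sum array s (s[i] = s[i-1] + ans[i][1] - ans[i][0] + 1); [] for empty ans
-- is unreachable under Pre_ (A raises IndexError on empty ranges).
def pvPrefixA (ans : List (List Int)) : List Int :=
  match ans with
  | [] => []
  | a0 :: rest =>
    rest.foldl
      (fun s r => s ++ [s.getLast?.getD 0 + (PySem.List.pyGetD r 1 0 - PySem.List.pyGetD r 0 0 + 1)])
      [PySem.List.pyGetD a0 1 0 - PySem.List.pyGetD a0 0 0 + 1]

-- A's per-query body (Python's local `ss` is dead code and not ported).
def pvQueryA (ans : List (List Int)) (s : List Int) (qq : Int) : Int :=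
  let i := PySem.List.bisectLeft s qq
  if i = s.length then -1
  else
    let d := PySem.List.pyGetD s (i : Int) 0 - qq
    PySem.List.pyGetD (PySem.List.pyGetD ans (i : Int) []) 1 0 - d

def kthSmallestNum (n : Int) (ranges : List (List Int)) (q : Int) (queries : List Int) : List Int :=
  let rs := PySem.List.sorted ranges (fun r => r) false          -- ranges.sort()
  let ans := (PySem.List.pyRange 1 n).foldl
      (fun a i => pvMergeStepA a (PySem.List.pyGetD rs i [])) [PySem.List.pyGetD rs 0 []]
  let s := pvPrefixA ans
  queries.foldl (fun fans qq => fans ++ [pvQueryA ans s qq]) []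

-- ===== PORT B =====
-- B's merge-loop body, on (lo, hi) pairs; merged is never empty in Python B, so the
-- `none` arm is unreachable.
def pvMergeStepB (m : List (Int × Int)) (r : List Int) : List (Int × Int) :=
  let lo := PySem.List.pyGetD r 0 0
  let hi := PySem.List.pyGetD r 1 0
  match m.getLast? with
  | some (mlo, mhi) =>
    if mhi ≥ lo then (if hi > mhi then m.dropLast ++ [(mlo, hi)] else m)
    else m ++ [(lo, hi)]
  | none => m ++ [(lo, hi)]

-- B's `answer(qq)`: linear scan with running count.
def pvAnswerB (merged : List (Int × Int)) (run qq : Int) : Int :=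
  match merged with
  | [] => -1
  | (lo, hi) :: t =>
    let cnt := hi - lo + 1
    if run + cnt ≥ qq then lo + (qq - run - 1) else pvAnswerB t (run + cnt) qq

def kthSmallestNum_alt (n : Int) (ranges : List (List Int)) (q : Int) (queries : List Int) : List Int :=
  let rs := PySem.List.sorted ranges (fun r => r) false          -- ranges.sort()
  let first := PySem.List.pyGetD rs 0 []
  let merged := (PySem.List.pyRange 1 n).foldl
      (fun m i => pvMergeStepB m (PySem.List.pyGetD rs i []))
      [(PySem.List.pyGetD first 0 0, PySem.List.pyGetD first 1 0)]
  queries.map (fun qq => pvAnswerB merged 0 qq)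

-- ===== PRECONDITION & SPEC =====
-- Pre_ excludes inputs on which A raises (empty ranges, n > len(ranges), a row of fewer
-- than 2 elements among the first max(n,1) sorted rows — the only rows either program
-- reads) and malformed ranges with lo > hi among those rows, on which A's prefix-sum
-- array is not sorted and bisect_left's position is accidental.
def Pre_kthSmallestNum (n : Int) (ranges : List (List Int)) (q : Int) (queries : List Int) : Prop :=
  ranges ≠ [] ∧ n ≤ (ranges.length : Int) ∧
    ∀ r ∈ (PySem.List.sorted ranges (fun r => r) false).take (max n 1).toNat,
      2 ≤ r.length ∧ r.getD 0 0 ≤ r.getD 1 0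
instance (n : Int) (ranges : List (List Int)) (q : Int) (queries : List Int) : Decidable (Pre_kthSmallestNum n ranges q queries) := by unfold Pre_kthSmallestNum; infer_instance

def pvWitness_kthSmallestNum : Int × List (List Int) × Int × List Int :=
  (2, [[4, 6], [1, 2]], 2, [3, 10])

def Spec_kthSmallestNum (n : Int) (ranges : List (List Int)) (q : Int) (queries : List Int) (out : List Int) : Prop := out = kthSmallestNum_alt n ranges q queries
instance (n : Int) (ranges : List (List Int)) (q : Int) (queries : List Int) (out : List Int) : Decidable (Spec_kthSmallestNum n ranges q queries out) := by unfold Spec_kthSmallestNum; infer_instance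

-- ===== CLAIM (what is proved, stated in full; the proofs are below) =====
def Claim_equal_kthSmallestNum : Prop := ∀ (n : Int) (ranges : List (List Int)) (q : Int) (queries : List Int), Dom_kthSmallestNum n ranges q queries → Pre_kthSmallestNum n ranges q queries → Spec_kthSmallestNum n ranges q queries (kthSmallestNum n ranges q queries)

-- ===== LEMMAS AND PROOFS =====

-- the two fields of a row either program ever reads
def pvProj (r : List Int) : Int × Int := (PySem.List.pyGetD r 0 0, PySem.List.pyGetD r 1 0)

-- a usable row: its first field is at most its second
def pvShape' (r : List Int) : Prop := PySem.List.pyGetD r 0 0 ≤ PySem.List.pyGetD r 1 0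

lemma pvGetD_zero (r : List Int) : PySem.List.pyGetD r 0 0 = r.getD 0 0 := by
  simpa using PySem.List.pyGetD_natCast r 0 0

lemma pvGetD_one (r : List Int) : PySem.List.pyGetD r 1 0 = r.getD 1 0 := by
  simpa using PySem.List.pyGetD_natCast r 1 0

-- one merge step in correspondence: A's row-level state projects to B's pair-level state
lemma pvMergeStep_corr (ans : List (List Int)) (m : List (Int × Int))
    (hproj : ans.map pvProj = m) (hne : m ≠ []) (hinv : ∀ p ∈ m, p.1 ≤ p.2)
    (r : List Int) (hr : pvShape' r) :
    (pvMergeStepA ans r).map pvProj = pvMergeStepB m r ∧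
    pvMergeStepB m r ≠ [] ∧
    (∀ p ∈ pvMergeStepB m r, p.1 ≤ p.2) := by
  have hansne : ans ≠ [] := by
    intro h; rw [h] at hproj; exact hne hproj.symm
  obtain ⟨mlo, mhi, hgl⟩ : ∃ a b, m.getLast hne = (a, b) :=
    ⟨(m.getLast hne).1, (m.getLast hne).2, rfl⟩
  have hml : m.getLast? = some (mlo, mhi) := by
    rw [List.getLast?_eq_some_getLast hne, hgl]
  have hmem : (mlo, mhi) ∈ m := hgl ▸ List.getLast_mem hne
  have hmle : mlo ≤ mhi := hinv (mlo, mhi) hmem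
  have hcat : m.dropLast ++ [(mlo, mhi)] = m := by
    have := List.dropLast_concat_getLast hne
    rwa [hgl] at this
  have hal : ans.getLast? = some (ans.getLast hansne) := List.getLast?_eq_some_getLast hansne
  have hpl : pvProj (ans.getLast hansne) = (mlo, mhi) := by
    have h1 : (ans.map pvProj).getLast? = some (pvProj (ans.getLast hansne)) := by
      rw [List.getLast?_map, hal]; rfl
    rw [hproj, hml] at h1
    exact (Option.some.inj h1).symm
  set lo := PySem.List.pyGetD r 0 0 with hlo
  set hi := PySem.List.pyGetD r 1 0 with hhi
  have hA : pvMergeStepA ans r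
      = if mhi ≥ lo then ans.dropLast ++ [[mlo, max mhi hi]] else ans ++ [r] := by
    have h0 : PySem.List.pyGetD (ans.getLast?.getD []) 0 0 = mlo := by
      rw [hal]; simpa using congrArg Prod.fst hpl
    have h1 : PySem.List.pyGetD (ans.getLast?.getD []) 1 0 = mhi := by
      rw [hal]; simpa using congrArg Prod.snd hpl
    simp [pvMergeStepA, h0, h1, ← hlo, ← hhi]
  have hB : pvMergeStepB m r
      = if mhi ≥ lo then (if hi > mhi then m.dropLast ++ [(mlo, hi)] else m)
        else m ++ [(lo, hi)] := by
    simp [pvMergeStepB, hml, ← hlo, ← hhi]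
  have hprojpair : ∀ a b : Int, pvProj [a, b] = (a, b) := by
    intro a b
    simp [pvProj, pvGetD_one]
  refine ⟨?_, ?_, ?_⟩
  · rw [hA, hB]
    by_cases hge : mhi ≥ lo
    · simp only [if_pos hge, List.map_append, List.map_dropLast, hproj]
      by_cases hgt : hi > mhi
      · have hmax : max mhi hi = hi := by omega
        simp [hmax, hgt, hprojpair]
      · have hmax : max mhi hi = mhi := by omega
        simp only [hgt, if_false, hmax, List.map_cons, List.map_nil, hprojpair]
        exact hcat
    · simp only [if_neg hge, List.map_append, hproj, List.map_cons, List.map_nil]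
      have : pvProj r = (lo, hi) := by simp [pvProj, ← hlo, ← hhi]
      rw [this]
  · rw [hB]
    split_ifs with h1 h2 <;> simp [hne]
  · rw [hB]
    split_ifs with h1 h2
    · intro p hp
      rcases List.mem_append.mp hp with h | h
      · exact hinv p (List.dropLast_subset m h)
      · have : p = (mlo, hi) := by simpa using h
        subst this; simp; omega
    · exact hinv
    · intro p hp
      rcases List.mem_append.mp hp with h | h
      · exact hinv p h
      · have : p = (lo, hi) := by simpa using h
        subst this; simpa using hr

-- merge correspondence over a whole index list
lemma pvMerge_corr (idxs : List Int) (rs : List (List Int)) :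
    ∀ (ans : List (List Int)) (m : List (Int × Int)),
      ans.map pvProj = m → m ≠ [] → (∀ p ∈ m, p.1 ≤ p.2) →
      (∀ i ∈ idxs, pvShape' (PySem.List.pyGetD rs i [])) →
      ((idxs.foldl (fun a i => pvMergeStepA a (PySem.List.pyGetD rs i [])) ans).map pvProj
        = idxs.foldl (fun m i => pvMergeStepB m (PySem.List.pyGetD rs i [])) m) ∧
      idxs.foldl (fun m i => pvMergeStepB m (PySem.List.pyGetD rs i [])) m ≠ [] ∧
      (∀ p ∈ idxs.foldl (fun m i => pvMergeStepB m (PySem.List.pyGetD rs i [])) m, p.1 ≤ p.2) := by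
  induction idxs with
  | nil => intro ans m h1 h2 h3 _; exact ⟨h1, h2, h3⟩
  | cons i t ih =>
    intro ans m h1 h2 h3 hsh
    obtain ⟨he, hn, hi3⟩ :=
      pvMergeStep_corr ans m h1 h2 h3 (PySem.List.pyGetD rs i []) (hsh i (by simp))
    have := ih _ _ he hn hi3 (fun j hj => hsh j (by simp [hj]))
    simpa [List.foldl_cons] using this

-- shifted prefix sums of the merged pairs
def pvS (run : Int) : List (Int × Int) → List Int
  | [] => []
  | (lo, hi) :: t => (run + (hi - lo + 1)) :: pvS (run + (hi - lo + 1)) t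

lemma pvFoldS (t : List (List Int)) :
    ∀ (acc : List Int),
      t.foldl
        (fun s r => s ++ [s.getLast?.getD 0 + (PySem.List.pyGetD r 1 0 - PySem.List.pyGetD r 0 0 + 1)])
        acc
      = acc ++ pvS (acc.getLast?.getD 0) (t.map pvProj) := by
  induction t with
  | nil => intro acc; simp [pvS]
  | cons r t ih =>
    intro acc
    rw [List.foldl_cons, ih]
    simp [pvS, pvProj]

lemma pvPrefixA_eq (ans : List (List Int)) (hne : ans ≠ []) :
    pvPrefixA ans = pvS 0 (ans.map pvProj) := by
  match ans, hne with
  | a0 :: rest, _ =>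
    rw [pvPrefixA, pvFoldS]
    simp [pvS, pvProj]

lemma pvS_length (run : Int) (M : List (Int × Int)) : (pvS run M).length = M.length := by
  induction M generalizing run with
  | nil => rfl
  | cons p t ih => obtain ⟨lo, hi⟩ := p; simp [pvS, ih]

lemma pvS_le_mem (run : Int) (M : List (Int × Int)) (h : ∀ p ∈ M, p.1 ≤ p.2) :
    ∀ y ∈ pvS run M, run ≤ y := by
  induction M generalizing run with
  | nil => simp [pvS]
  | cons p t ih =>
    obtain ⟨lo, hi⟩ := p
    intro y hy
    have hlo : lo ≤ hi := h (lo, hi) (by simp)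
    rcases (by simpa [pvS] using hy : y = run + (hi - lo + 1) ∨ y ∈ pvS (run + (hi - lo + 1)) t) with h1 | h1
    · omega
    · have := ih (run + (hi - lo + 1)) (fun p hp => h p (by simp [hp])) y h1
      omega

lemma pvS_pairwise (run : Int) (M : List (Int × Int)) (h : ∀ p ∈ M, p.1 ≤ p.2) :
    (pvS run M).Pairwise (· ≤ ·) := by
  induction M generalizing run with
  | nil => simp [pvS]
  | cons p t ih =>
    obtain ⟨lo, hi⟩ := p
    refine List.pairwise_cons.mpr ⟨?_, ih _ (fun p hp => h p (by simp [hp]))⟩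
    exact pvS_le_mem _ _ (fun p hp => h p (by simp [hp]))

-- bisect_left on a sorted list is the first index whose value is ≥ x
lemma pvBisect_eq_findIdx (s : List Int) (x : Int) (hs : s.Pairwise (· ≤ ·)) :
    PySem.List.bisectLeft s x = s.findIdx (fun v => decide (x ≤ v)) := by
  obtain ⟨h1, h2, h3⟩ := PySem.List.bisectLeft_spec s x hs
  rcases Nat.lt_or_ge (PySem.List.bisectLeft s x) s.length with hlt | hge
  · symm
    rw [List.findIdx_eq hlt]
    refine ⟨by simpa using h3 _ hlt le_rfl, fun j hj => ?_⟩
    simpa using not_le.mpr (h2 j (hj.trans hlt) hj)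
  · have heq : PySem.List.bisectLeft s x = s.length := le_antisymm h1 hge
    rw [heq]
    by_contra hne
    have hflt : s.findIdx (fun v => decide (x ≤ v)) < s.length :=
      lt_of_le_of_ne List.findIdx_le_length (fun h => hne h.symm)
    have hp := (List.findIdx_eq hflt).mp rfl
    have := h2 _ hflt (heq ▸ hflt)
    simp at hp
    omega

-- A's query answered from the shifted prefix sums equals B's scan with running count
lemma pvQuery_corr (M : List (Int × Int)) :
    ∀ run qq : Int,
      (if (pvS run M).findIdx (fun v => decide (qq ≤ v)) = (pvS run M).length then (-1 : Int)
       else (M.getD ((pvS run M).findIdx (fun v => decide (qq ≤ v))) (0, 0)).2 -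
            ((pvS run M).getD ((pvS run M).findIdx (fun v => decide (qq ≤ v))) 0 - qq))
      = pvAnswerB M run qq := by
  induction M with
  | nil => intro run qq; simp [pvS, pvAnswerB]
  | cons p t ih =>
    intro run qq
    obtain ⟨lo, hi⟩ := p
    by_cases hc : qq ≤ run + (hi - lo + 1)
    · simp [pvS, pvAnswerB, List.findIdx_cons, hc]
      omega
    · simp [pvS, pvAnswerB, List.findIdx_cons, hc]
      simpa using ih (run + (hi - lo + 1)) qq

-- per-query bridge: pvQueryA on A's merged rows and prefix array is B's scan
lemma pvQueryA_eq (ans : List (List Int)) (M : List (Int × Int))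
    (hproj : ans.map pvProj = M) (hM : ∀ p ∈ M, p.1 ≤ p.2) (qq : Int) :
    pvQueryA ans (pvS 0 M) qq = pvAnswerB M 0 qq := by
  have hb := pvBisect_eq_findIdx (pvS 0 M) qq (pvS_pairwise 0 M hM)
  rw [← pvQuery_corr M 0 qq]
  rw [pvQueryA, hb]
  by_cases hlen : (pvS 0 M).findIdx (fun v => decide (qq ≤ v)) = (pvS 0 M).length
  · simp [hlen]
  · have hlt : (pvS 0 M).findIdx (fun v => decide (qq ≤ v)) < (pvS 0 M).length :=
      lt_of_le_of_ne List.findIdx_le_length hlen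
    have hltM : (pvS 0 M).findIdx (fun v => decide (qq ≤ v)) < M.length := by
      rwa [pvS_length] at hlt
    have hltA : (pvS 0 M).findIdx (fun v => decide (qq ≤ v)) < ans.length := by
      have hl : ans.length = M.length := by
        simpa using congrArg List.length hproj
      omega
    have hMi : pvProj (ans[(pvS 0 M).findIdx (fun v => decide (qq ≤ v))]'hltA)
        = M[(pvS 0 M).findIdx (fun v => decide (qq ≤ v))]'hltM := by
      have h := congrArg (fun l : List (Int × Int) => l.getD ((pvS 0 M).findIdx (fun v => decide (qq ≤ v))) (0, 0)) hproj
      simp only at h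
      rwa [List.getD_eq_getElem _ _ (by simpa using hltA), List.getElem_map,
           List.getD_eq_getElem _ _ hltM] at h
    simp only [hlen, if_false]
    rw [PySem.List.pyGetD_natCast, PySem.List.pyGetD_natCast,
        List.getD_eq_getElem _ _ hlt,
        List.getD_eq_getElem _ _ hltA,
        List.getD_eq_getElem _ _ hltM,
        ← hMi]
    simp [pvProj]

-- ===== VERDICT (by name: the statement is the Claim_ definition above) =====
theorem kthSmallestNum_spec : Claim_equal_kthSmallestNum := by
  intro n ranges q queries _ hpre
  obtain ⟨hne, hnlen, hshape⟩ := hpre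
  show kthSmallestNum n ranges q queries = kthSmallestNum_alt n ranges q queries
  rw [kthSmallestNum, kthSmallestNum_alt]
  have hrslen : (PySem.List.sorted ranges (fun r => r) false).length = ranges.length :=
    PySem.List.length_sorted _ _ _
  have hrs : PySem.List.sorted ranges (fun r => r) false ≠ [] := by
    simpa [PySem.List.sorted_eq_nil_iff] using hne
  -- shape of every row either program reads
  have hshape' : ∀ i : Int, 0 ≤ i → (i < n ∨ i = 0) →
      pvShape' (PySem.List.pyGetD (PySem.List.sorted ranges (fun r => r) false) i []) := by
    intro i hi0 hin
    have hpos : 0 < ranges.length := List.length_pos_of_ne_nil hne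
    have hilen : i.toNat < (PySem.List.sorted ranges (fun r => r) false).length := by
      rw [hrslen]; omega
    have hget : PySem.List.pyGetD (PySem.List.sorted ranges (fun r => r) false) i []
        = (PySem.List.sorted ranges (fun r => r) false)[i.toNat] := by
      have h1 : PySem.List.pyGetD (PySem.List.sorted ranges (fun r => r) false) i []
          = (PySem.List.sorted ranges (fun r => r) false).getD i.toNat [] := by
        have hcast : i = (i.toNat : Int) := by omega
        rw [hcast, PySem.List.pyGetD_natCast]
        have h2 : (((i.toNat : Int)).toNat) = i.toNat := Int.toNat_natCast _
        rw [h2]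
      rw [h1, List.getD_eq_getElem _ _ hilen]
    have hitake : i.toNat < (max n 1).toNat := by
      rcases hin with h | h
      · have hmx : n ≤ max n 1 := le_max_left _ _
        omega
      · have hmx : (1 : Int) ≤ max n 1 := le_max_right _ _
        omega
    have hmem : (PySem.List.sorted ranges (fun r => r) false)[i.toNat]
        ∈ (PySem.List.sorted ranges (fun r => r) false).take (max n 1).toNat := by
      have hlt : i.toNat < ((PySem.List.sorted ranges (fun r => r) false).take (max n 1).toNat).length := by
        simp [List.length_take]; omega
      have h2 : ((PySem.List.sorted ranges (fun r => r) false).take (max n 1).toNat)[i.toNat]'hlt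
          = (PySem.List.sorted ranges (fun r => r) false)[i.toNat]'hilen := by
        simp [List.getElem_take]
      exact h2 ▸ List.getElem_mem hlt
    obtain ⟨_, hle⟩ := hshape _ hmem
    rw [hget, pvShape', pvGetD_zero, pvGetD_one]
    exact hle
  -- merge correspondence
  have hinit : ([PySem.List.pyGetD (PySem.List.sorted ranges (fun r => r) false) 0 []]).map pvProj
      = [(PySem.List.pyGetD (PySem.List.pyGetD (PySem.List.sorted ranges (fun r => r) false) 0 []) 0 0,
          PySem.List.pyGetD (PySem.List.pyGetD (PySem.List.sorted ranges (fun r => r) false) 0 []) 1 0)] := by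
    simp [pvProj]
  have hinv0 : ∀ p ∈ [(PySem.List.pyGetD (PySem.List.pyGetD (PySem.List.sorted ranges (fun r => r) false) 0 []) 0 0,
          PySem.List.pyGetD (PySem.List.pyGetD (PySem.List.sorted ranges (fun r => r) false) 0 []) 1 0)],
      p.1 ≤ p.2 := by
    intro p hp
    have hsh0 := hshape' 0 le_rfl (Or.inr rfl)
    have : p = (PySem.List.pyGetD (PySem.List.pyGetD (PySem.List.sorted ranges (fun r => r) false) 0 []) 0 0,
          PySem.List.pyGetD (PySem.List.pyGetD (PySem.List.sorted ranges (fun r => r) false) 0 []) 1 0) := by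
      simpa using hp
    subst this
    exact hsh0
  have hshidx : ∀ i ∈ PySem.List.pyRange 1 n,
      pvShape' (PySem.List.pyGetD (PySem.List.sorted ranges (fun r => r) false) i []) := by
    intro i hi
    have := (PySem.List.mem_pyRange_one).mp hi
    exact hshape' i (by omega) (Or.inl (by omega))
  obtain ⟨hfold, hMne, hMinv⟩ :=
    pvMerge_corr (PySem.List.pyRange 1 n) (PySem.List.sorted ranges (fun r => r) false)
      _ _ hinit (by simp) hinv0 hshidx
  have hansne : ((PySem.List.pyRange 1 n).foldl
      (fun a i => pvMergeStepA a (PySem.List.pyGetD (PySem.List.sorted ranges (fun r => r) false) i []))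
      [PySem.List.pyGetD (PySem.List.sorted ranges (fun r => r) false) 0 []]) ≠ [] := by
    intro h
    rw [h] at hfold
    exact hMne hfold.symm
  rw [pvPrefixA_eq _ hansne, hfold, PySem.List.foldl_append_singleton_eq_map]
  exact List.map_congr_left (fun qq _ => pvQueryA_eq _ _ hfold hMinv qq)
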